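-- pv_equiv track=rewrite | github.com/xiara125/practice | 2024.04.18/모의고사.py | solution
-- ===== SOURCE A (Python) =====
-- def solution(answers):
--     answer = []
--     answers_num = len(answers)
--
--     student_01, student_02, student_03 = [], [], []
--
--     score_01, score_02, score_03 = 0, 0, 0
--
--     for i in range(answers_num):
--         student_01.append((i%5)+1)
--
--         if len(student_02) < answers_num:
--             if (i%5)+1 != 2:
--                 student_02.extend([2, (i%5)+1])
--             student_02 = student_02[:answers_num]
--
--             if i%5 == 0:
--                  student_03.extend([(i%5)+3, (i%5)+3])
--             elif i%5 < 3:
--                 student_03.extend([i%5, i%5])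
--             else :
--                 student_03.extend([(i%5)+1, (i%5)+1])
--             student_03 = student_03[:answers_num]
--
--     for i, ans in enumerate(answers):
--         if ans == student_01[i]:
--             score_01 += 1
--         if ans == student_02[i]:
--             score_02 += 1
--         if ans == student_03[i]:
--             score_03 += 1
--
--     if score_01 == max(score_01, score_02, score_03):
--         answer.append(1)
--     if score_02 == max(score_01, score_02, score_03):
--         answer.append(2)
--     if score_03 == max(score_01, score_02, score_03):
--         answer.append(3)
--
--     return answer
-- ===== SOURCE B (Python) =====
-- def solution(answers):
--     cnt = {}
--     for i, a in enumerate(answers):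
--         key = (i % 40, a)
--         cnt[key] = cnt.get(key, 0) + 1
--     patterns = [[1, 2, 3, 4, 5],
--                 [2, 1, 2, 3, 2, 4, 2, 5],
--                 [3, 3, 1, 1, 2, 2, 4, 4, 5, 5]]
--     scores = [sum(cnt.get((r, pat[r % len(pat)]), 0) for r in range(40))
--               for pat in patterns]
--     best = max(scores)
--     return [k for k, s in enumerate(scores, 1) if s == best]
-- ===== Notes on version B (the rewrite author's own statement) =====
-- stated objective: faster
-- what changed: B builds a frequency dictionary keyed by (index mod 40, answer) in one pass and computes each student's score as a sum of 40 table lookups (40 = lcm of the pattern periods), so the per-element comparison against each student's answers disappears, unlike A's quadratic build-lists-by-extend-and-reslice followed by elementwise comparison.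
import Mathlib
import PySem

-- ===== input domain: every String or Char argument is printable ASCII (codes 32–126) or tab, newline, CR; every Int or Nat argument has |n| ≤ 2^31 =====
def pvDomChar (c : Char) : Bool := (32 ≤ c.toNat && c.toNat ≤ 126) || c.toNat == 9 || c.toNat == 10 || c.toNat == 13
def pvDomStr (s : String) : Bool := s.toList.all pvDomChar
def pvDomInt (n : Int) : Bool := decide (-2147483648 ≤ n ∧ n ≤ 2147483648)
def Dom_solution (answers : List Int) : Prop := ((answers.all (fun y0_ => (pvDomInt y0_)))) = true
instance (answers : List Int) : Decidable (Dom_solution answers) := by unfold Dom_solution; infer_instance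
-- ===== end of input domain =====

-- B replaces A's quadratic build-lists-by-extend-and-reslice scoring with one pass building a
-- frequency dictionary keyed by (index mod 40, answer), then 40 table lookups per student (faster).


-- ===== PORT A =====
-- one iteration of A's building loop (student_01/02/03); xs[:n] with 0 ≤ n is slice none (some n)
def buildStep (answersNum : Int) (st : List Int × List Int × List Int) (i : Int) :
    List Int × List Int × List Int :=
  let s1 := st.1 ++ [PySem.Int.mod i 5 + 1]
  if (st.2.1.length : Int) < answersNum then
    let s2 := if PySem.Int.mod i 5 + 1 ≠ 2 then st.2.1 ++ [2, PySem.Int.mod i 5 + 1] else st.2.1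
    let s2 := PySem.List.slice s2 none (some answersNum)
    let s3 :=
      if PySem.Int.mod i 5 = 0 then st.2.2 ++ [PySem.Int.mod i 5 + 3, PySem.Int.mod i 5 + 3]
      else if PySem.Int.mod i 5 < 3 then st.2.2 ++ [PySem.Int.mod i 5, PySem.Int.mod i 5]
      else st.2.2 ++ [PySem.Int.mod i 5 + 1, PySem.Int.mod i 5 + 1]
    let s3 := PySem.List.slice s3 none (some answersNum)
    (s1, s2, s3)
  else (s1, st.2.1, st.2.2)

-- one iteration of A's scoring loop; student_0k[i] is always in range (lists have length n),
-- so the default 0 of pyGetD is never used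
def scoreStep (s1 s2 s3 : List Int) (sc : Int × Int × Int) (p : Int × Int) : Int × Int × Int :=
  let c1 := if p.2 = PySem.List.pyGetD s1 p.1 0 then sc.1 + 1 else sc.1
  let c2 := if p.2 = PySem.List.pyGetD s2 p.1 0 then sc.2.1 + 1 else sc.2.1
  let c3 := if p.2 = PySem.List.pyGetD s3 p.1 0 then sc.2.2 + 1 else sc.2.2
  (c1, c2, c3)

def solution (answers : List Int) : List Int :=
  let answersNum : Int := (answers.length : Int)
  let built := (PySem.List.pyRange 0 answersNum 1).foldl (buildStep answersNum) ([], [], [])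
  let scores := (PySem.List.enumerate answers 0).foldl
    (scoreStep built.1 built.2.1 built.2.2) (0, 0, 0)
  let m := max scores.1 (max scores.2.1 scores.2.2)
  let answer : List Int := if scores.1 = m then ([] : List Int) ++ [1] else []
  let answer := if scores.2.1 = m then answer ++ [2] else answer
  let answer := if scores.2.2 = m then answer ++ [3] else answer
  answer

-- ===== PORT B =====
-- cnt[(i % 40, a)] += 1 over enumerate(answers); cnt.get(key, 0) is Dict.getD key 0
def solution_alt (answers : List Int) : List Int :=
  let cnt := (PySem.List.enumerate answers 0).foldl
      (fun (d : PySem.Dict (Int × Int) Int) p =>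
        let key := (PySem.Int.mod p.1 40, p.2)
        d.insert key (d.getD key 0 + 1)) PySem.Dict.empty
  let patterns : List (List Int) :=
    [[1, 2, 3, 4, 5], [2, 1, 2, 3, 2, 4, 2, 5], [3, 3, 1, 1, 2, 2, 4, 4, 5, 5]]
  let scores := patterns.map (fun pat =>
      ((PySem.List.pyRange 0 40 1).map (fun r =>
          cnt.getD (r, PySem.List.pyGetD pat (PySem.Int.mod r (pat.length : Int)) 0) 0)).sum)
  -- max(scores); scores is a nonempty literal list, so getD's default 0 is never used
  let best := (PySem.List.max? scores (fun x => x)).getD 0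
  ((PySem.List.enumerate scores 1).filter (fun ks => ks.2 = best)).map Prod.fst

-- ===== PRECONDITION & SPEC =====
def Spec_solution (answers : List Int) (out : List Int) : Prop := out = solution_alt answers
instance (answers : List Int) (out : List Int) : Decidable (Spec_solution answers out) := by unfold Spec_solution; infer_instance

-- ===== CLAIM (what is proved, stated in full; the proofs are below) =====
def Claim_equal_solution : Prop := ∀ (answers : List Int), Dom_solution answers → Spec_solution answers (solution answers)

-- ===== LEMMAS AND PROOFS =====

-- the three students' answers as functions of the position
def g1 (k : Nat) : Int := ((k % 5 : Nat) : Int) + 1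
def g2 (j : Nat) : Int := ([2, 1, 2, 3, 2, 4, 2, 5] : List Int).getD (j % 8) 0
def g3 (j : Nat) : Int := ([3, 3, 1, 1, 2, 2, 4, 4, 5, 5] : List Int).getD (j % 10) 0

-- length of student_02's untruncated list after k iterations of A's building loop
def len2 (k : Nat) : Nat := 2 * (k - (k + 3) / 5)

-- score of a student answering pat periodically, as one pass of indicator sums
def matchCount (answers : List Int) (pat : List Int) : Int :=
  ((PySem.List.enumerate answers 0).map
    (fun p => if p.2 = PySem.List.pyGetD pat (PySem.Int.mod p.1 (pat.length : Int)) 0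
              then (1 : Int) else 0)).sum

lemma mod5 (k : Nat) : PySem.Int.mod (k : Int) 5 = ((k % 5 : Nat) : Int) := by
  rw [show (5 : Int) = ((5 : Nat) : Int) from rfl, PySem.Int.mod_natCast]

lemma map_range_add_two (g : Nat → Int) (L : Nat) :
    (List.range (L + 2)).map g = (List.range L).map g ++ [g L, g (L + 1)] := by
  rw [show L + 2 = (L + 1) + 1 from rfl, List.range_succ, List.range_succ]
  simp

lemma g2_append (k : Nat) :
    (List.range (len2 (k + 1))).map g2 =
      (List.range (len2 k)).map g2 ++
        (if ((k % 5 : Nat) : Int) + 1 ≠ 2 then [2, ((k % 5 : Nat) : Int) + 1] else []) := by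
  have h5 : k % 5 < 5 := Nat.mod_lt _ (by omega)
  interval_cases h : k % 5
  · have v1 : g2 (len2 k) = 2 := by unfold g2; rw [show len2 k % 8 = 0 by unfold len2; omega]; decide
    have v2 : g2 (len2 k + 1) = 1 := by unfold g2; rw [show (len2 k + 1) % 8 = 1 by unfold len2; omega]; decide
    rw [show len2 (k + 1) = len2 k + 2 by unfold len2; omega, map_range_add_two, v1, v2]
    norm_num [h]
  · rw [show len2 (k + 1) = len2 k by unfold len2; omega]
    norm_num [h]
  · have v1 : g2 (len2 k) = 2 := by unfold g2; rw [show len2 k % 8 = 2 by unfold len2; omega]; decide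
    have v2 : g2 (len2 k + 1) = 3 := by unfold g2; rw [show (len2 k + 1) % 8 = 3 by unfold len2; omega]; decide
    rw [show len2 (k + 1) = len2 k + 2 by unfold len2; omega, map_range_add_two, v1, v2]
    norm_num [h]
  · have v1 : g2 (len2 k) = 2 := by unfold g2; rw [show len2 k % 8 = 4 by unfold len2; omega]; decide
    have v2 : g2 (len2 k + 1) = 4 := by unfold g2; rw [show (len2 k + 1) % 8 = 5 by unfold len2; omega]; decide
    rw [show len2 (k + 1) = len2 k + 2 by unfold len2; omega, map_range_add_two, v1, v2]
    norm_num [h]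
  · have v1 : g2 (len2 k) = 2 := by unfold g2; rw [show len2 k % 8 = 6 by unfold len2; omega]; decide
    have v2 : g2 (len2 k + 1) = 5 := by unfold g2; rw [show (len2 k + 1) % 8 = 7 by unfold len2; omega]; decide
    rw [show len2 (k + 1) = len2 k + 2 by unfold len2; omega, map_range_add_two, v1, v2]
    norm_num [h]

lemma g3_append (k : Nat) :
    (List.range (2 * (k + 1))).map g3 =
      (List.range (2 * k)).map g3 ++
        (if ((k % 5 : Nat) : Int) = 0 then [((k % 5 : Nat) : Int) + 3, ((k % 5 : Nat) : Int) + 3]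
         else if ((k % 5 : Nat) : Int) < 3 then [((k % 5 : Nat) : Int), ((k % 5 : Nat) : Int)]
         else [((k % 5 : Nat) : Int) + 1, ((k % 5 : Nat) : Int) + 1]) := by
  have h5 : k % 5 < 5 := Nat.mod_lt _ (by omega)
  have hsplit : 2 * (k + 1) = 2 * k + 2 := by omega
  interval_cases h : k % 5 <;>
  · rw [hsplit, map_range_add_two,
        show g3 (2 * k) = ([3,3,1,1,2,2,4,4,5,5] : List Int).getD (2 * (k % 5)) 0 by
          unfold g3; rw [show (2 * k) % 10 = 2 * (k % 5) by omega],
        show g3 (2 * k + 1) = ([3,3,1,1,2,2,4,4,5,5] : List Int).getD (2 * (k % 5) + 1) 0 by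
          unfold g3; rw [show (2 * k + 1) % 10 = 2 * (k % 5) + 1 by omega]]
    norm_num [h]

lemma take_map_range (g : Nat → Int) (n L : Nat) :
    ((List.range L).map g).take n = (List.range (min n L)).map g := by
  rw [← List.map_take, List.take_range]

lemma take_append_take {α : Type} (l c : List α) (n : Nat) :
    (l.take n ++ c).take n = (l ++ c).take n := by
  rw [List.take_append, List.take_append, List.take_take]
  simp
  omega

lemma build_foldl (n k : Nat) (hk : k ≤ n) :
    (List.range k).foldl
        (fun (st : List Int × List Int × List Int) (j : Nat) => buildStep (n : Int) st (j : Int))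
        ([], [], []) =
      ((List.range k).map g1,
       (List.range (min n (len2 k))).map g2,
       (List.range (min n (2 * k))).map g3) := by
  induction k with
  | zero => simp [len2]
  | succ k ih =>
      rw [List.range_succ, List.foldl_append, ih (by omega)]
      show buildStep (n : Int) _ (k : Int) = _
      unfold buildStep
      rw [mod5 k]
      simp only [List.length_map, List.length_range]
      by_cases hg : len2 k < n
      · rw [if_pos (by exact_mod_cast show min n (len2 k) < n by omega)]
        have hA : min n (len2 k) = len2 k := by omega
        have e2 : (if ((k % 5 : Nat) : Int) + 1 ≠ 2
              then (List.range (min n (len2 k))).map g2 ++ [2, ((k % 5 : Nat) : Int) + 1]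
              else (List.range (min n (len2 k))).map g2)
            = (List.range (len2 (k + 1))).map g2 := by
          rw [hA, g2_append k]; split_ifs <;> simp
        have e3 : (if ((k % 5 : Nat) : Int) = 0
              then (List.range (min n (2 * k))).map g3 ++ [((k % 5 : Nat) : Int) + 3, ((k % 5 : Nat) : Int) + 3]
              else if ((k % 5 : Nat) : Int) < 3
              then (List.range (min n (2 * k))).map g3 ++ [((k % 5 : Nat) : Int), ((k % 5 : Nat) : Int)]
              else (List.range (min n (2 * k))).map g3 ++ [((k % 5 : Nat) : Int) + 1, ((k % 5 : Nat) : Int) + 1])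
            = (((List.range (2 * k)).map g3).take n ++
                (if ((k % 5 : Nat) : Int) = 0 then [((k % 5 : Nat) : Int) + 3, ((k % 5 : Nat) : Int) + 3]
                 else if ((k % 5 : Nat) : Int) < 3 then [((k % 5 : Nat) : Int), ((k % 5 : Nat) : Int)]
                 else [((k % 5 : Nat) : Int) + 1, ((k % 5 : Nat) : Int) + 1])) := by
          rw [take_map_range]; split_ifs <;> simp
        rw [e2, e3, PySem.List.slice_to_natCast, PySem.List.slice_to_natCast,
            take_append_take, ← g3_append k, take_map_range, take_map_range]
        simp [g1]
      · rw [if_neg (by exact_mod_cast show ¬ (min n (len2 k) < n) by omega)]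
        have b1 : min n (len2 k) = n := by omega
        have b2 : min n (len2 (k + 1)) = n := by unfold len2 at *; omega
        have b3 : min n (2 * k) = n := by unfold len2 at *; omega
        have b4 : min n (2 * (k + 1)) = n := by unfold len2 at *; omega
        rw [b1, b2, b3, b4]
        simp [g1]

lemma build_pyRange (n : Nat) :
    (PySem.List.pyRange 0 (n : Int) 1).foldl (buildStep (n : Int)) ([], [], []) =
      ((List.range n).map g1, (List.range n).map g2, (List.range n).map g3) := by
  rw [PySem.List.pyRange_one]
  simp only [sub_zero, Int.toNat_natCast, List.foldl_map, zero_add]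
  rw [build_foldl n n le_rfl]
  rw [show min n (len2 n) = n by unfold len2; omega, show min n (2 * n) = n by omega]

lemma fuse3 (l : List (Int × Int)) (q1 q2 q3 : Int × Int → Prop)
    [DecidablePred q1] [DecidablePred q2] [DecidablePred q3] (a b c : Int) :
    l.foldl (fun sc p =>
        (if q1 p then sc.1 + 1 else sc.1,
         if q2 p then sc.2.1 + 1 else sc.2.1,
         if q3 p then sc.2.2 + 1 else sc.2.2)) (a, b, c) =
      (a + (l.map (fun p => if q1 p then (1 : Int) else 0)).sum,
       b + (l.map (fun p => if q2 p then (1 : Int) else 0)).sum,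
       c + (l.map (fun p => if q3 p then (1 : Int) else 0)).sum) := by
  induction l generalizing a b c with
  | nil => simp
  | cons p t ih =>
      simp only [List.foldl_cons, List.map_cons, List.sum_cons, ih]
      simp only [Prod.mk.injEq]
      refine ⟨?_, ?_, ?_⟩ <;> split_ifs <;> ring

lemma g1_eq (k : Nat) : g1 k = ([1, 2, 3, 4, 5] : List Int).getD (k % 5) 0 := by
  unfold g1
  have h5 : k % 5 < 5 := Nat.mod_lt _ (by omega)
  interval_cases h : k % 5 <;> norm_num

lemma score_foldl (answers : List Int) :
    (PySem.List.enumerate answers 0).foldl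
        (scoreStep ((List.range answers.length).map g1)
          ((List.range answers.length).map g2) ((List.range answers.length).map g3)) (0, 0, 0) =
      (matchCount answers [1, 2, 3, 4, 5], matchCount answers [2, 1, 2, 3, 2, 4, 2, 5],
       matchCount answers [3, 3, 1, 1, 2, 2, 4, 4, 5, 5]) := by
  unfold matchCount
  rw [PySem.List.foldl_congr_mem (g := fun (sc : Int × Int × Int) (p : Int × Int) =>
      (if p.2 = PySem.List.pyGetD [1, 2, 3, 4, 5]
            (PySem.Int.mod p.1 ((([1, 2, 3, 4, 5] : List Int).length : Int))) 0
       then sc.1 + 1 else sc.1,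
       if p.2 = PySem.List.pyGetD [2, 1, 2, 3, 2, 4, 2, 5]
            (PySem.Int.mod p.1 ((([2, 1, 2, 3, 2, 4, 2, 5] : List Int).length : Int))) 0
       then sc.2.1 + 1 else sc.2.1,
       if p.2 = PySem.List.pyGetD [3, 3, 1, 1, 2, 2, 4, 4, 5, 5]
            (PySem.Int.mod p.1 ((([3, 3, 1, 1, 2, 2, 4, 4, 5, 5] : List Int).length : Int))) 0
       then sc.2.2 + 1 else sc.2.2))]
  · rw [fuse3]
    simp
  · intro acc p hp
    rcases (PySem.List.mem_enumerate_iff answers 0 p).1 hp with ⟨k, hk, rfl⟩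
    unfold scoreStep
    simp only [zero_add, PySem.List.pyGetD_natCast,
      PySem.List.getD_map_range g1 answers.length k 0 hk,
      PySem.List.getD_map_range g2 answers.length k 0 hk,
      PySem.List.getD_map_range g3 answers.length k 0 hk]
    rw [show ((([1, 2, 3, 4, 5] : List Int).length : Int)) = ((5 : Nat) : Int) from rfl,
        show ((([2, 1, 2, 3, 2, 4, 2, 5] : List Int).length : Int)) = ((8 : Nat) : Int) from rfl,
        show ((([3, 3, 1, 1, 2, 2, 4, 4, 5, 5] : List Int).length : Int)) = ((10 : Nat) : Int) from rfl]
    simp only [PySem.Int.mod_natCast, PySem.List.pyGetD_natCast]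
    rw [g1_eq k]
    rfl

lemma best_eq (a b c : Int) :
    (PySem.List.max? [a, b, c] (fun x => x)).getD 0 = max a (max b c) := by
  rw [PySem.List.max?_id_cons]; simp [max_assoc]

-- ===== B-side lemmas: the dict of counts computes the same three indicator sums =====

lemma sum_map_zero_of_not_mem (R : List Int) (m : Int) (g : Int → Int) (hm : m ∉ R) :
    (R.map (fun r => if r = m then g r else 0)).sum = 0 := by
  induction R with
  | nil => simp
  | cons r t ih =>
      simp only [List.mem_cons, not_or] at hm
      have hr : ¬ (r = m) := fun h => hm.1 h.symm
      simp [List.map_cons, if_neg hr, ih hm.2]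

lemma sum_map_ite_of_nodup (R : List Int) (m : Int) (g : Int → Int)
    (hnd : R.Nodup) (hm : m ∈ R) :
    (R.map (fun r => if r = m then g r else 0)).sum = g m := by
  induction R with
  | nil => simp at hm
  | cons r t ih =>
      rcases List.mem_cons.1 hm with h | h
      · subst h
        simp [sum_map_zero_of_not_mem t m g (by simpa using (List.nodup_cons.1 hnd).1)]
      · have hr : r ≠ m := fun he => (List.nodup_cons.1 hnd).1 (he ▸ h)
        simp [if_neg hr, ih (List.nodup_cons.1 hnd).2 h]

-- sum over r in range(40) of counts of (r, F r) = one pass of indicators over l,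
-- provided every first component of l is a nonnegative (Nat-cast) index
lemma sum_counts (l : List (Int × Int)) (F : Int → Int)
    (h : ∀ p ∈ l, ∃ k : Nat, p.1 = (k : Int)) :
    ((PySem.List.pyRange 0 40 1).map (fun r =>
        ((PySem.Dict.counter
            (l.map (fun p => (PySem.Int.mod p.1 40, p.2)))).getD (r, F r) 0))).sum =
      (l.map (fun p => if p.2 = F (PySem.Int.mod p.1 40) then (1 : Int) else 0)).sum := by
  induction l with
  | nil => simp [PySem.Dict.getD_counter]
  | cons x t ih =>
      rcases h x (List.mem_cons_self ..) with ⟨k, hk⟩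
      have hm40 : PySem.Int.mod x.1 40 = ((k % 40 : Nat) : Int) := by
        rw [hk, show (40 : Int) = ((40 : Nat) : Int) from rfl, PySem.Int.mod_natCast]
      have hmem : PySem.Int.mod x.1 40 ∈ PySem.List.pyRange 0 40 1 := by
        rw [PySem.List.mem_pyRange_one, hm40]
        constructor
        · exact_mod_cast Nat.zero_le _
        · exact_mod_cast Nat.mod_lt _ (by omega)
      have hcount : ∀ r : Int,
          ((PySem.Dict.counter
              ((x :: t).map (fun p => (PySem.Int.mod p.1 40, p.2)))).getD (r, F r) 0) =
            ((PySem.Dict.counter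
              (t.map (fun p => (PySem.Int.mod p.1 40, p.2)))).getD (r, F r) 0) +
            (if (r, F r) = (PySem.Int.mod x.1 40, x.2) then (1 : Int) else 0) := by
        intro r
        simp only [List.map_cons, PySem.Dict.getD_counter, List.count_cons, beq_iff_eq]
        push_cast
        split_ifs with ha hb <;> simp_all [eq_comm]
      have hmap : ((PySem.List.pyRange 0 40 1).map (fun r =>
            if (r, F r) = (PySem.Int.mod x.1 40, x.2) then (1 : Int) else 0)) =
          ((PySem.List.pyRange 0 40 1).map (fun r =>
            if r = PySem.Int.mod x.1 40
            then (if x.2 = F r then (1 : Int) else 0) else 0)) := by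
        refine List.map_congr_left (fun r _ => ?_)
        by_cases h1 : r = PySem.Int.mod x.1 40 <;> by_cases h2 : x.2 = F r <;>
          simp [Prod.ext_iff, h1, h2, eq_comm]
      calc ((PySem.List.pyRange 0 40 1).map (fun r =>
              ((PySem.Dict.counter
                  ((x :: t).map (fun p => (PySem.Int.mod p.1 40, p.2)))).getD (r, F r) 0))).sum
          = ((PySem.List.pyRange 0 40 1).map (fun r =>
              ((PySem.Dict.counter
                  (t.map (fun p => (PySem.Int.mod p.1 40, p.2)))).getD (r, F r) 0))).sum +
            ((PySem.List.pyRange 0 40 1).map (fun r =>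
              (if (r, F r) = (PySem.Int.mod x.1 40, x.2) then (1 : Int) else 0))).sum := by
            rw [← List.sum_map_add]
            exact congrArg List.sum (List.map_congr_left (fun r _ => hcount r))
        _ = (t.map (fun p => if p.2 = F (PySem.Int.mod p.1 40) then (1 : Int) else 0)).sum +
            (if x.2 = F (PySem.Int.mod x.1 40) then (1 : Int) else 0) := by
            rw [ih (fun p hp => h p (List.mem_cons_of_mem _ hp)), hmap,
              sum_map_ite_of_nodup _ _ _ (PySem.List.nodup_pyRange_one 0 40) hmem]
        _ = _ := by simp [List.map_cons, List.sum_cons]; ring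

-- F (i mod 40) collapses to the matchCount indicator because each pattern's length divides 40
lemma alt_score_eq (answers : List Int) (pat : List Int)
    (hdvd : pat.length ∣ 40) :
    ((PySem.List.pyRange 0 40 1).map (fun r =>
        ((PySem.Dict.counter
            ((PySem.List.enumerate answers 0).map (fun p => (PySem.Int.mod p.1 40, p.2)))).getD
          (r, PySem.List.pyGetD pat (PySem.Int.mod r (pat.length : Int)) 0) 0))).sum =
      matchCount answers pat := by
  rw [sum_counts (PySem.List.enumerate answers 0)
      (fun r => PySem.List.pyGetD pat (PySem.Int.mod r (pat.length : Int)) 0)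
      (fun p hp => by
        rcases (PySem.List.mem_enumerate_iff answers 0 p).1 hp with ⟨k, hk, rfl⟩
        exact ⟨k, by simp⟩)]
  unfold matchCount
  refine congrArg List.sum (List.map_congr_left (fun p hp => ?_))
  rcases (PySem.List.mem_enumerate_iff answers 0 p).1 hp with ⟨k, hk, rfl⟩
  simp only [zero_add]
  rw [show PySem.Int.mod (k : Int) 40 = ((k % 40 : Nat) : Int) by
        rw [show (40 : Int) = ((40 : Nat) : Int) from rfl, PySem.Int.mod_natCast],
      show ((pat.length : Nat) : Int) = ((pat.length : Nat) : Int) from rfl,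
      PySem.Int.mod_natCast, PySem.Int.mod_natCast,
      Nat.mod_mod_of_dvd k hdvd]

-- counter form of B's dict-building fold
lemma cnt_eq_counter (answers : List Int) :
    (PySem.List.enumerate answers 0).foldl
        (fun (d : PySem.Dict (Int × Int) Int) p =>
          let key := (PySem.Int.mod p.1 40, p.2)
          d.insert key (d.getD key 0 + 1)) PySem.Dict.empty =
      PySem.Dict.counter
        ((PySem.List.enumerate answers 0).map (fun p => (PySem.Int.mod p.1 40, p.2))) := by
  rw [← PySem.Dict.foldl_insert_getD_add_one_eq_counter, List.foldl_map]

-- ===== VERDICT (by name: the statement is the Claim_ definition above) =====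
theorem solution_spec : Claim_equal_solution := by
  unfold Claim_equal_solution
  intro answers _
  unfold Spec_solution solution solution_alt
  simp only []
  rw [build_pyRange answers.length]
  simp only [List.map_cons, List.map_nil]
  rw [score_foldl answers]
  simp only [cnt_eq_counter answers,
      alt_score_eq answers [1, 2, 3, 4, 5] (by decide),
      alt_score_eq answers [2, 1, 2, 3, 2, 4, 2, 5] (by decide),
      alt_score_eq answers [3, 3, 1, 1, 2, 2, 4, 4, 5, 5] (by decide)]
  simp only [best_eq, PySem.List.enumerate_cons, PySem.List.enumerate_nil,
    List.filter_cons, List.filter_nil, decide_eq_true_eq]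
  split_ifs <;> rfl
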